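-- pv_equiv track=rewrite | github.com/merveozan/CENG461_FALL21_Artificial-Intelligence_HWs | Party Constraint Solver/main.py | assigment_check
-- ===== SOURCE A (Python) =====
-- def assigment_check(i,domain):
--     count = 0
--     new_list = copy_list(domain)
--     for j in new_list:
--         if i in j:
--             j.remove(i)
--     for k in new_list:
--         count += len(k)
--     return count
--
-- def copy_list(food_domain):
--     new_list = []
--     for i in food_domain:
--         sub_list = []
--         for j in i:
--             sub_list.append(j)
--         new_list.append(sub_list)
--
--     return new_list
-- ===== SOURCE B (Python) =====
-- def assigment_check(i, domain):
--     # total element count minus one per sublist containing i; no copying, no mutation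
--     return sum(len(j) for j in domain) - sum(1 for j in domain if i in j)
-- ===== Notes on version B (the rewrite author's own statement) =====
-- stated objective: simpler
-- what changed: Replaces the deep-copy helper plus mutate-then-sum two-phase loop with a single arithmetic formula: total element count minus the number of sublists containing i (remove deletes exactly one element per containing sublist).
import Mathlib
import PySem

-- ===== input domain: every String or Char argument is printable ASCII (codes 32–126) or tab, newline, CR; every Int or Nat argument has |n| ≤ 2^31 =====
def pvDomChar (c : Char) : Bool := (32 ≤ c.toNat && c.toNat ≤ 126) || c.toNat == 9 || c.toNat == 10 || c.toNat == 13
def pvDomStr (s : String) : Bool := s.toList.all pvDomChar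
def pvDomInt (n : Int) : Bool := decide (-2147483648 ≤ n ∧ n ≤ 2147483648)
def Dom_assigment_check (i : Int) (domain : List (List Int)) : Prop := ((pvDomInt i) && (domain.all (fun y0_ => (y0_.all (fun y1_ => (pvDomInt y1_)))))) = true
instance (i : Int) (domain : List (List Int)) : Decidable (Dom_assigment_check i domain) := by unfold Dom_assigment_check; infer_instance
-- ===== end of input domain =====

-- B replaces A's deep-copy + mutate-then-sum phases by one arithmetic formula (objective: simpler).
-- ===== PORT A =====
def copy_list (food_domain : List (List Int)) : List (List Int) :=
  food_domain.foldl (fun new_list i => new_list ++ [i.foldl (fun sub_list j => sub_list ++ [j]) []]) []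

def assigment_check (i : Int) (domain : List (List Int)) : Int :=
  let new_list := copy_list domain
  -- for j in new_list: if i in j: j.remove(i)   (mutation modelled as per-element replacement)
  let new_list := new_list.map (fun j => if i ∈ j then (PySem.List.remove? j i).getD j else j)
  new_list.foldl (fun count k => count + (k.length : Int)) 0

-- ===== PORT B =====
def assigment_check_alt (i : Int) (domain : List (List Int)) : Int :=
  ((domain.map (fun j => (j.length : Int))).sum) - ((domain.countP (fun j => decide (i ∈ j)) : Int))

-- ===== PRECONDITION & SPEC =====
def Spec_assigment_check (i : Int) (domain : List (List Int)) (out : Int) : Prop := out = assigment_check_alt i domain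
instance (i : Int) (domain : List (List Int)) (out : Int) : Decidable (Spec_assigment_check i domain out) := by unfold Spec_assigment_check; infer_instance

-- ===== CLAIM =====
def Claim_equal_assigment_check : Prop := ∀ (i : Int) (domain : List (List Int)), Dom_assigment_check i domain → Spec_assigment_check i domain (assigment_check i domain)

-- ===== LEMMAS AND PROOFS =====
theorem pv_inner_copy (l acc : List Int) : l.foldl (fun s j => s ++ [j]) acc = acc ++ l := by
  induction l generalizing acc with
  | nil => simp
  | cons x xs ih => simp [List.foldl, ih]

theorem pv_copy_go (d acc : List (List Int)) :
    d.foldl (fun new_list i => new_list ++ [i.foldl (fun s j => s ++ [j]) []]) acc = acc ++ d := by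
  induction d generalizing acc with
  | nil => simp
  | cons x xs ih => rw [List.foldl_cons, ih, pv_inner_copy]; simp

theorem pv_copy_list_eq (d : List (List Int)) : copy_list d = d := by
  rw [copy_list, pv_copy_go]; simp

theorem pv_foldl_len (l : List (List Int)) (acc : Int) :
    l.foldl (fun count k => count + (k.length : Int)) acc = acc + (l.map (fun k => (k.length : Int))).sum := by
  induction l generalizing acc with
  | nil => simp
  | cons x xs ih => simp [List.foldl, ih]; ring

theorem pv_len_removed (i : Int) (j : List Int) :
    (((if i ∈ j then (PySem.List.remove? j i).getD j else j).length : Int))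
      = (j.length : Int) - (if i ∈ j then 1 else 0) := by
  by_cases h : i ∈ j
  · have := PySem.List.remove?_eq_some_erase j i h
    simp [h, this, List.length_erase_of_mem h]
    have : 0 < j.length := List.length_pos_of_mem h
    omega
  · simp [h]

-- ===== VERDICT =====
theorem pv_main (i : Int) (d : List (List Int)) :
    ((d.map (fun j => if i ∈ j then (PySem.List.remove? j i).getD j else j)).map
        (fun k => (k.length : Int))).sum
      = (d.map (fun k => (k.length : Int))).sum - (d.countP (fun j => decide (i ∈ j)) : Int) := by
  induction d with
  | nil => simp
  | cons x xs ih =>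
    simp only [List.map_cons, List.sum_cons, List.countP_cons, ih, pv_len_removed i x]
    by_cases h : i ∈ x <;> simp [h] <;> ring

theorem assigment_check_spec : Claim_equal_assigment_check := by
  intro i domain _
  show assigment_check i domain = assigment_check_alt i domain
  simp only [assigment_check, assigment_check_alt, pv_copy_list_eq, pv_foldl_len, zero_add]
  exact pv_main i domain
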